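-- pv_equiv track=rewrite | github.com/pai10464/python | moredc/moredc_34.py | pattern5
-- ===== SOURCE A (Python) =====
-- def pattern5(N):
--     ans = [[1]]
--     i = 2
--     if N == 0:
--         return []
--     for e in range(N - 1):
--         ans.append([0])
--     for e in range(N - 1):
--         for j in range(N - 1, e + 1, -1):
--             ans[j].append(0)
--         ans[e + 1].append(i)
--         i += 1
--     for e in range(N - 1):
--         for j in range(N - 1 - e):
--             ans[j].append(i)
--             i += 1
--     return ans
-- ===== SOURCE B (Python) =====
-- def pattern5(N):
--     # Direct closed form: cell (r, c) is 0 below the diagonal; on diagonal d = c - r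
--     # the count continues from the previous diagonals: d*N - d*(d-1)//2 + r + 1.
--     return [[0 if c < r else (c - r) * N - (c - r) * (c - r - 1) // 2 + r + 1
--              for c in range(N)]
--             for r in range(N)]
-- ===== Notes on version B (the rewrite author's own statement) =====
-- stated objective: simpler
-- what changed: Replaces A's three stateful append sweeps over a mutable list of rows (with a running counter i) by a direct double comprehension that computes each cell from a closed-form diagonal formula.
-- intended difference: For N < 0 A returns [[1]] (its seed list, an accident of initializing ans=[[1]] before any size check), while B returns the empty matrix [], the intended value for a negative size. — e.g. on pattern5(-1): A returns [[1]], B returns []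
import Mathlib
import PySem

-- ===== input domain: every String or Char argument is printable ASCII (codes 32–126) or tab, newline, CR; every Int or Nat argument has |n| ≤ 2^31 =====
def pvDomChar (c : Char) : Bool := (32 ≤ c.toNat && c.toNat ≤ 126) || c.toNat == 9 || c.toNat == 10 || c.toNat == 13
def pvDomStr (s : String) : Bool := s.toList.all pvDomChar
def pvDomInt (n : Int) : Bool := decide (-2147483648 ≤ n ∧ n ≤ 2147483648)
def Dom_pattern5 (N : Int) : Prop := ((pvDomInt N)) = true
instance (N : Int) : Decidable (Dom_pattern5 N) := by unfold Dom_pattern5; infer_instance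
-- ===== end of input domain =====

-- B replaces A's three stateful append sweeps (with a running counter) by a direct
-- double comprehension computing each cell from a closed-form diagonal formula (objective: simpler).

-- ===== PORT A =====
-- ans[j].append(v): every index A uses is in range (0 ≤ j < len(ans)), so set/getD is exact here
def pushRow (a : List (List Int)) (j : Int) (v : Int) : List (List Int) :=
  a.set j.toNat (a.getD j.toNat [] ++ [v])

-- body of A's second loop (inner countdown over j, then ans[e+1].append(i); i += 1)
def p5Step1 (N : Int) (s : List (List Int) × Int) (e : Int) : List (List Int) × Int :=
  let a := (PySem.List.pyRange (N - 1) (e + 1) (-1)).foldl (fun a j => pushRow a j 0) s.1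
  (pushRow a (e + 1) s.2, s.2 + 1)

-- body of A's third loop (inner loop appending i to rows 0..N-2-e)
def p5Step2 (N : Int) (s : List (List Int) × Int) (e : Int) : List (List Int) × Int :=
  (PySem.List.pyRange 0 (N - 1 - e) 1).foldl (fun s j => (pushRow s.1 j s.2, s.2 + 1)) s

def pattern5 (N : Int) : List (List Int) :=
  if N = 0 then []
  else
    let ans := (PySem.List.pyRange 0 (N - 1) 1).foldl (fun a _ => a ++ [[0]]) [[1]]
    let s := (PySem.List.pyRange 0 (N - 1) 1).foldl (p5Step1 N) (ans, 2)
    let t := (PySem.List.pyRange 0 (N - 1) 1).foldl (p5Step2 N) s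
    t.1

-- ===== PORT B =====
def pattern5_alt (N : Int) : List (List Int) :=
  (PySem.List.pyRange 0 N 1).map (fun r =>
    (PySem.List.pyRange 0 N 1).map (fun c =>
      if c < r then 0
      else (c - r) * N - PySem.Int.floordiv ((c - r) * (c - r - 1)) 2 + r + 1))

-- ===== PRECONDITION & SPEC =====
-- For N < 0 A returns [[1]] (its seed list, an accident of initializing ans=[[1]] before any size
-- check), while B returns the empty matrix [], the intended value for a negative size.
def D_pattern5 (N : Int) : Prop := N < 0
instance (N : Int) : Decidable (D_pattern5 N) := by unfold D_pattern5; infer_instance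

def Spec_pattern5 (N : Int) (out : List (List Int)) : Prop := ¬ D_pattern5 N → out = pattern5_alt N
instance (N : Int) (out : List (List Int)) : Decidable (Spec_pattern5 N out) := by
  unfold Spec_pattern5; infer_instance

def pvDiffWitness_pattern5 : Int := (-1)
def pvDiffWitnessOut_pattern5 : (List (List Int)) × (List (List Int)) := ([[1]], [])

-- ===== CLAIM (what is proved, stated in full; the proofs are below) =====
def Claim_unchanged_pattern5 : Prop := ∀ (N : Int), Dom_pattern5 N → Spec_pattern5 N (pattern5 N)
def Claim_changed_pattern5 : Prop := Dom_pattern5 (pvDiffWitness_pattern5) ∧ D_pattern5 (pvDiffWitness_pattern5) ∧ pattern5 (pvDiffWitness_pattern5) = pvDiffWitnessOut_pattern5.1 ∧ pattern5_alt (pvDiffWitness_pattern5) = pvDiffWitnessOut_pattern5.2 ∧ pvDiffWitnessOut_pattern5.1 ≠ pvDiffWitnessOut_pattern5.2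
def Claim_exact_pattern5 : Prop := ∀ (N : Int), Dom_pattern5 N → D_pattern5 N → pattern5 N ≠ pattern5_alt N

-- ===== LEMMAS AND PROOFS =====

def cellG (n r c : Nat) : Int :=
  if c < r then 0
  else ((c : Int) - r) * n - PySem.Int.floordiv (((c : Int) - r) * ((c : Int) - r - 1)) 2 + r + 1

def row1 (k r : Nat) : List Int :=
  if r = 0 then [1]
  else if r ≤ k then List.replicate r 0 ++ [(r : Int) + 1]
  else List.replicate (k + 1) 0

def row2 (n k r : Nat) : List Int :=
  (List.range (r + 1 + min k (n - 1 - r))).map (cellG n r)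

def ctr2 (m k : Nat) : Int := ((List.range k).map (fun (e : Nat) => (m : Int) - (e : Int))).sum

theorem pushRow_map_range (n : Nat) (f : Nat → List Int) (j : Int) (hj0 : 0 ≤ j)
    (hj : j < (n : Int)) (v : Int) :
    pushRow ((List.range n).map f) j v
      = (List.range n).map (fun (r : Nat) => if (r : Int) = j then f r ++ [v] else f r) := by
  rcases Int.eq_ofNat_of_zero_le hj0 with ⟨p, rfl⟩
  have hp : p < n := by exact_mod_cast hj
  unfold pushRow
  rw [Int.toNat_natCast, PySem.List.getD_map_range f n p [] hp]
  apply List.ext_getElem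
  · simp
  · intro i h1 h2
    simp only [List.getElem_set, List.getElem_map, List.getElem_range]
    have : ((i : Int) = (p : Int)) ↔ (i = p) := by exact_mod_cast Iff.rfl
    by_cases hip : p = i
    · subst hip; simp
    · have hne : ¬ ((i : Int) = (p : Int)) := by exact_mod_cast fun h => hip (Eq.symm h)
      rw [if_neg hip, if_neg hne]

theorem foldl_push_down (n : Nat) (f : Nat → List Int) (v b : Int) (t : Nat)
    (hb : 0 ≤ b) (hbt : b + t < (n : Int)) :
    (PySem.List.pyRange (b + t) b (-1)).foldl (fun a j => pushRow a j v) ((List.range n).map f)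
      = (List.range n).map
          (fun (r : Nat) => if b < (r : Int) ∧ (r : Int) ≤ b + t then f r ++ [v] else f r) := by
  induction t generalizing f with
  | zero =>
      rw [PySem.List.pyRange_neg_one_eq_nil (by omega)]
      simp only [List.foldl_nil]
      apply List.map_congr_left
      intro r _
      rw [if_neg (by push_cast; omega)]
  | succ t ih =>
      push_cast at hbt ⊢
      rw [show b + ((t : Int) + 1) = b + t + 1 from by ring]
      rw [PySem.List.pyRange_neg_one_cons (by omega)]
      simp only [List.foldl_cons]
      rw [show b + (t : Int) + 1 - 1 = b + t from by ring]
      rw [pushRow_map_range n f (b + t + 1) (by omega) (by omega) v]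
      rw [ih _ (by omega)]
      apply List.map_congr_left
      intro r hr
      rw [List.mem_range] at hr
      by_cases h1 : (r : Int) = b + t + 1
      · rw [if_neg (by omega), if_pos h1, if_pos (by omega)]
      · by_cases h2 : b < (r : Int) ∧ (r : Int) ≤ b + t
        · rw [if_pos h2, if_neg h1, if_pos (by omega)]
        · rw [if_neg h2, if_neg h1, if_neg (by omega)]

theorem foldl_push_counter (n : Nat) (f : Nat → List Int) (i0 : Int) (m : Nat) (hm : m ≤ n) :
    (PySem.List.pyRange 0 (m : Int) 1).foldl
        (fun (s : List (List Int) × Int) j => (pushRow s.1 j s.2, s.2 + 1))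
        ((List.range n).map f, i0)
      = ((List.range n).map (fun (r : Nat) => if r < m then f r ++ [i0 + (r : Int)] else f r),
         i0 + m) := by
  induction m with
  | zero =>
      rw [show ((0 : Nat) : Int) = 0 from rfl, PySem.List.pyRange_one_eq_nil (by omega)]
      simp only [List.foldl_nil]
      simp only [Prod.mk.injEq]
      refine ⟨?_, ?_⟩
      · apply List.map_congr_left; intro r _; rw [if_neg (by omega)]
      · simp
  | succ m ih =>
      push_cast
      rw [PySem.List.pyRange_one_succ_right (by positivity)]
      rw [List.foldl_append]
      rw [ih (by omega)]
      simp only [List.foldl_cons, List.foldl_nil]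
      simp only [Prod.mk.injEq]
      refine ⟨?_, ?_⟩
      · rw [pushRow_map_range n _ (m : Int) (by positivity) (by exact_mod_cast hm) _]
        apply List.map_congr_left
        intro r hr
        rw [List.mem_range] at hr
        by_cases h1 : r = m
        · subst h1
          rw [if_pos (by exact_mod_cast rfl), if_neg (by omega), if_pos (by omega)]
        · by_cases h2 : r < m
          · rw [if_neg (by exact_mod_cast h1), if_pos h2, if_pos (by omega)]
          · rw [if_neg (by exact_mod_cast h1), if_neg h2, if_neg (by omega)]
      · ring

theorem phase1 (m k : Nat) (hk : k ≤ m) :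
    (PySem.List.pyRange 0 (k : Int) 1).foldl (p5Step1 ((m : Int) + 1))
        ((List.range (m + 1)).map (row1 0), 2)
      = ((List.range (m + 1)).map (row1 k), (k : Int) + 2) := by
  induction k with
  | zero =>
      rw [show ((0 : Nat) : Int) = 0 from rfl, PySem.List.pyRange_one_eq_nil (by omega)]
      simp
  | succ k ih =>
      push_cast
      rw [PySem.List.pyRange_one_succ_right (by positivity), List.foldl_append,
          ih (by omega)]
      simp only [List.foldl_cons, List.foldl_nil]
      unfold p5Step1
      simp only []
      rw [show (m : Int) + 1 - 1 = ((k : Int) + 1) + ((m - (k+1) : Nat) : Int) from by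
            push_cast [Nat.cast_sub (by omega : k + 1 ≤ m)]; ring]
      rw [foldl_push_down (m + 1) (row1 k) 0 ((k : Int) + 1) (m - (k+1)) (by positivity)
            (by push_cast [Nat.cast_sub (by omega : k + 1 ≤ m)]; omega)]
      rw [pushRow_map_range (m + 1) _ ((k : Int) + 1) (by positivity) (by push_cast; omega) _]
      simp only [Prod.mk.injEq]
      refine ⟨?_, by ring⟩
      apply List.map_congr_left
      intro r hr
      rw [List.mem_range] at hr
      have hcast : ((k : Int) + 1 + ((m - (k+1) : Nat) : Int)) = (m : Int) := by
        push_cast [Nat.cast_sub (by omega : k + 1 ≤ m)]; ring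
      rw [hcast]
      by_cases h0 : r = 0
      · subst h0
        rw [if_neg (by push_cast; omega), if_neg (by push_cast; omega)]
        rfl
      · by_cases h1 : r ≤ k
        · rw [if_neg (by omega), if_neg (by omega)]
          unfold row1
          rw [if_neg h0, if_neg h0, if_pos h1, if_pos (by omega)]
        · by_cases h2 : r = k + 1
          · subst h2
            rw [if_pos (by push_cast; ring), if_neg (by push_cast; omega)]
            unfold row1
            rw [if_neg h0, if_neg h0, if_neg (by omega), if_pos (by omega)]
            push_cast
            ring_nf
          · rw [if_neg (by omega), if_pos (by omega)]
            unfold row1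
            rw [if_neg h0, if_neg h0, if_neg (by omega), if_neg (by omega)]
            rw [← List.replicate_succ']

theorem ctr2_double (m k : Nat) : 2 * ctr2 m k = k * (2 * (m : Int) + 1 - k) := by
  induction k with
  | zero => simp [ctr2]
  | succ k ih =>
      unfold ctr2 at *
      rw [List.range_succ, List.map_append, List.sum_append]
      simp only [List.map_singleton, List.sum_singleton]
      push_cast
      linear_combination ih

theorem counter_val (m k r : Nat) (_hk : k ≤ m) :
    (m : Int) + 2 + ctr2 m k + r = cellG (m + 1) r (r + 1 + k) := by
  have hd := ctr2_double m k
  unfold cellG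
  rw [if_neg (by omega)]
  rw [show ((r + 1 + k : Nat) : Int) - r = (k : Int) + 1 from by push_cast; ring]
  rw [show ((k : Int) + 1 - 1) = (k : Int) from by ring]
  rcases Int.even_mul_succ_self (k : Int) with ⟨q, hq⟩
  rw [show ((k : Int) + 1) * k = 2 * q from by linarith [hq]]
  rw [PySem.Int.floordiv_eq_ediv_of_pos (by norm_num), Int.mul_ediv_cancel_left q (by norm_num)]
  push_cast
  nlinarith [hd, hq]

theorem phase2 (m k : Nat) (hk : k ≤ m) :
    (PySem.List.pyRange 0 (k : Int) 1).foldl (p5Step2 ((m : Int) + 1))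
        ((List.range (m + 1)).map (row2 (m + 1) 0), (m : Int) + 2)
      = ((List.range (m + 1)).map (row2 (m + 1) k), (m : Int) + 2 + ctr2 m k) := by
  induction k with
  | zero =>
      rw [show ((0 : Nat) : Int) = 0 from rfl, PySem.List.pyRange_one_eq_nil (by omega)]
      simp [ctr2]
  | succ k ih =>
      push_cast
      rw [PySem.List.pyRange_one_succ_right (by positivity), List.foldl_append, ih (by omega)]
      simp only [List.foldl_cons, List.foldl_nil]
      unfold p5Step2
      rw [show (m : Int) + 1 - 1 - (k : Int) = ((m - k : Nat) : Int) from by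
            push_cast [Nat.cast_sub (by omega : k ≤ m)]; ring]
      rw [foldl_push_counter (m + 1) (row2 (m + 1) k) ((m : Int) + 2 + ctr2 m k) (m - k)
            (by omega)]
      simp only [Prod.mk.injEq]
      refine ⟨?_, ?_⟩
      · apply List.map_congr_left
        intro r hr
        rw [List.mem_range] at hr
        by_cases h1 : r < m - k
        · rw [if_pos h1]
          unfold row2
          simp only [Nat.add_sub_cancel]
          rw [show min k (m - r) = k from by omega, show min (k + 1) (m - r) = k + 1 from by omega]
          rw [show r + 1 + (k + 1) = (r + 1 + k) + 1 from by omega, List.range_succ,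
              List.map_append, List.map_singleton]
          rw [← counter_val m k r (by omega)]
        · rw [if_neg h1]
          unfold row2
          simp only [Nat.add_sub_cancel]
          rw [show min k (m - r) = m - r from by omega,
              show min (k + 1) (m - r) = m - r from by omega]
      · unfold ctr2
        rw [List.range_succ, List.map_append, List.sum_append]
        simp only [List.map_singleton, List.sum_singleton]
        push_cast [Nat.cast_sub (by omega : k ≤ m)]
        ring

theorem row1_full_eq_row2_zero (m r : Nat) (hr : r ≤ m) : row1 m r = row2 (m + 1) 0 r := by
  have hcell : cellG (m + 1) r r = (r : Int) + 1 := by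
    unfold cellG
    rw [if_neg (lt_irrefl r)]
    simp [PySem.Int.floordiv_eq_ediv_of_pos]
  have hrepl : (List.range r).map (cellG (m + 1) r) = List.replicate r (0 : Int) := by
    rw [show List.replicate r (0 : Int) = (List.range r).map (fun _ => (0 : Int)) from by
          simp [List.map_const']]
    apply List.map_congr_left
    intro c hc
    rw [List.mem_range] at hc
    unfold cellG
    rw [if_pos hc]
  have hR : row2 (m + 1) 0 r = List.replicate r 0 ++ [(r : Int) + 1] := by
    unfold row2
    simp only [Nat.add_sub_cancel, Nat.min_eq_left (by omega : 0 ≤ m - r)]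
    rw [List.range_succ, List.map_append, hrepl]
    simp [hcell]
  rw [hR]
  unfold row1
  by_cases h0 : r = 0
  · subst h0; simp
  · rw [if_neg h0, if_pos hr]

theorem pattern5_pos (m : Nat) : pattern5 ((m : Int) + 1) = pattern5_alt ((m : Int) + 1) := by
  unfold pattern5
  rw [if_neg (by omega)]
  rw [show (m : Int) + 1 - 1 = ((m : Nat) : Int) from by ring]
  -- phase 0: the first append loop builds [[1]] ++ m copies of [0]
  have h0 : (PySem.List.pyRange 0 (m : Int) 1).foldl
        (fun (a : List (List Int)) _ => a ++ [[0]]) [[1]]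
      = (List.range (m + 1)).map (row1 0) := by
    calc (PySem.List.pyRange 0 (m : Int) 1).foldl
            (fun (a : List (List Int)) _ => a ++ [[0]]) [[1]]
        = (((PySem.List.pyRange 0 (m : Int) 1).map (fun _ => ([0] : List Int))).foldl
            (fun a x => a ++ [x]) [[1]]) := by rw [List.foldl_map]
      _ = [[1]] ++ (PySem.List.pyRange 0 (m : Int) 1).map (fun _ => ([0] : List Int)) :=
            PySem.List.foldl_append_singleton _ _
      _ = [[1]] ++ List.replicate m ([0] : List Int) := by
            rw [List.map_const']
            simp [PySem.List.length_pyRange_one]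
      _ = (List.range (m + 1)).map (row1 0) := by
            rw [List.range_succ_eq_map, List.map_cons, List.map_map]
            rw [show row1 0 0 = [(1 : Int)] from rfl]
            rw [show (row1 0) ∘ Nat.succ = fun (_ : Nat) => [(0 : Int)] from
                  funext fun i => by unfold Function.comp row1; rw [if_neg (by omega), if_neg (by omega)]; rfl]
            rw [List.map_const']
            simp
  simp only [h0]
  rw [phase1 m m (le_refl m)]
  rw [show (List.range (m + 1)).map (row1 m) = (List.range (m + 1)).map (row2 (m + 1) 0) from
        List.map_congr_left fun r hr =>
          row1_full_eq_row2_zero m r (by rw [List.mem_range] at hr; omega)]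
  rw [phase2 m m (le_refl m)]
  show (List.range (m + 1)).map (row2 (m + 1) m) = _
  unfold pattern5_alt
  rw [show (m : Int) + 1 = ((m + 1 : Nat) : Int) from by push_cast; ring]
  rw [PySem.List.pyRange_zero_natCast (m + 1), List.map_map]
  apply List.map_congr_left
  intro r hr
  rw [List.mem_range] at hr
  unfold row2
  simp only [Nat.add_sub_cancel, Function.comp]
  rw [show min m (m - r) = m - r from by omega, show r + 1 + (m - r) = m + 1 from by omega]
  rw [List.map_map]
  apply List.map_congr_left
  intro c hc
  rw [List.mem_range] at hc
  simp only [Function.comp]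
  unfold cellG
  by_cases h : c < r
  · rw [if_pos h, if_pos (by exact_mod_cast h)]
  · rw [if_neg h, if_neg (by exact_mod_cast h)]

-- ===== VERDICT (by name: the statement is the Claim_ definition above) =====
theorem pattern5_spec : Claim_unchanged_pattern5 := by
  intro N _ hD
  unfold D_pattern5 at hD
  have h0 : 0 ≤ N := by omega
  rcases Int.eq_ofNat_of_zero_le h0 with ⟨n, rfl⟩
  cases n with
  | zero => decide
  | succ m =>
      have : ((m + 1 : Nat) : Int) = (m : Int) + 1 := by push_cast; ring
      rw [this]
      exact pattern5_pos m

theorem pattern5_changed : Claim_changed_pattern5 := by unfold Claim_changed_pattern5; decide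

theorem pattern5_tight : Claim_exact_pattern5 := by
  intro N _ hD
  unfold D_pattern5 at hD
  have hA : pattern5 N = [[1]] := by
    unfold pattern5
    rw [if_neg (by omega), PySem.List.pyRange_one_eq_nil (by omega)]
    rfl
  have hB : pattern5_alt N = [] := by
    unfold pattern5_alt
    rw [PySem.List.pyRange_one_eq_nil (by omega)]
    rfl
  rw [hA, hB]; simp
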